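-- pv_equiv track=rewrite | github.com/AiricDev/context-footprint | extractors/python/cf_extractor/benchmark.py | _summarize_process_error
-- ===== SOURCE A (Python) =====
-- def _summarize_process_error(output: str) -> str:
--     lines = [line.strip() for line in output.splitlines() if line.strip()]
--     filtered = [line for line in lines if not line.startswith("[1/2]") and not line.startswith("[2/2]")]
--     if filtered:
--         return filtered[-1]
--     if lines:
--         return lines[-1]
--     return "unknown error"
-- ===== SOURCE B (Python) =====
-- def _summarize_process_error(output: str) -> str:
--     fallback = None
--     for line in reversed(output.splitlines()):
--         s = line.strip()
--         if not s:
--             continue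
--         if fallback is None:
--             fallback = s
--         if not s.startswith("[1/2]") and not s.startswith("[2/2]"):
--             return s
--     return fallback if fallback is not None else "unknown error"
-- ===== Notes on version B (the rewrite author's own statement) =====
-- stated objective: alternative
-- what changed: Replaces the two intermediate list comprehensions with a single backward scan over reversed splitlines that early-returns the first acceptable line and carries the last non-empty line as fallback.
import Mathlib
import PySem

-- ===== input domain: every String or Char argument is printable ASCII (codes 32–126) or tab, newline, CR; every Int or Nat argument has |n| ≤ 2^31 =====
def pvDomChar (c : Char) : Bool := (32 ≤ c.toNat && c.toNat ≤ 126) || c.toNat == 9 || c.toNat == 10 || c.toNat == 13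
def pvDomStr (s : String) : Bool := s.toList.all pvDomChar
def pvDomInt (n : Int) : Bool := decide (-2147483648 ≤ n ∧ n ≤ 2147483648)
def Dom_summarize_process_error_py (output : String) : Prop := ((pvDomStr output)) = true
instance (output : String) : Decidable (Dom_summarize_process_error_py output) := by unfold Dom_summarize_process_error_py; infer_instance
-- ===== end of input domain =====

-- B replaces A's two list comprehensions by a single backward scan with early return; same result, no speed claim.

-- ===== PORT A =====
def summarize_process_error_py (output : String) : String :=
  let lines := ((PySem.Str.splitlines output).filter
      (fun line => !(PySem.Str.strip line == ""))).map PySem.Str.strip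
  let filtered := lines.filter
      (fun line => !(PySem.Str.startswith line "[1/2]") && !(PySem.Str.startswith line "[2/2]"))
  match filtered.getLast? with
  | some v => v
  | none =>
    match lines.getLast? with
    | some v => v
    | none => "unknown error"

-- ===== PORT B =====
def spe_go : List String → Option String → String
  | [], some fb => fb
  | [], none => "unknown error"
  | line :: rest, fb =>
    let s := PySem.Str.strip line
    if s == "" then spe_go rest fb
    else
      let fb' := match fb with | some v => v | none => s
      if !(PySem.Str.startswith s "[1/2]") && !(PySem.Str.startswith s "[2/2]") then s
      else spe_go rest (some fb')

def summarize_process_error_py_alt (output : String) : String :=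
  spe_go (PySem.Str.splitlines output).reverse none

-- ===== PRECONDITION & SPEC =====
def Spec_summarize_process_error_py (output : String) (out : String) : Prop := out = summarize_process_error_py_alt output
instance (output : String) (out : String) : Decidable (Spec_summarize_process_error_py output out) := by unfold Spec_summarize_process_error_py; infer_instance

-- ===== CLAIM (what is proved, stated in full; the proofs are below) =====
def Claim_equal_summarize_process_error_py : Prop := ∀ (output : String), Dom_summarize_process_error_py output → Spec_summarize_process_error_py output (summarize_process_error_py output)

-- ===== LEMMAS AND PROOFS =====

-- proof-side copy of the backward scan with the two predicates abstracted out
def pvScan (ne good : String → Bool) : List String → Option String → String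
  | [], some fb => fb
  | [], none => "unknown error"
  | line :: rest, fb =>
    let s := PySem.Str.strip line
    if ne s then pvScan ne good rest fb
    else
      let fb' := match fb with | some v => v | none => s
      if good s then s
      else pvScan ne good rest (some fb')

theorem spe_go_eq_pvScan (R : List String) (fb : Option String) :
    spe_go R fb = pvScan (fun s => s == "")
      (fun s => !(PySem.Str.startswith s "[1/2]") && !(PySem.Str.startswith s "[2/2]")) R fb := by
  induction R generalizing fb with
  | nil => cases fb <;> rfl
  | cons line rest ih => simp only [spe_go, pvScan, ih]

theorem pvScan_spec (ne good : String → Bool) (R : List String) (fb : Option String) :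
    pvScan ne good R fb =
      match ((R.map PySem.Str.strip).filter (fun s => !(ne s) && good s)).head? with
      | some w => w
      | none =>
        match fb with
        | some v => v
        | none =>
          match ((R.map PySem.Str.strip).filter (fun s => !(ne s))).head? with
          | some v => v
          | none => "unknown error" := by
  induction R generalizing fb with
  | nil => cases fb <;> rfl
  | cons line rest ih =>
    simp only [pvScan, List.map_cons, List.filter_cons]
    by_cases hs : ne (PySem.Str.strip line) = true
    · simp [hs, ih]
    · have hs' : ne (PySem.Str.strip line) = false := by simpa using hs
      by_cases hg : good (PySem.Str.strip line) = true
      · simp [hs', hg]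
      · have hg' : good (PySem.Str.strip line) = false := by simpa using hg
        cases fb <;> simp [hs', hg', ih]

-- filter-after-map equals map-after-filter for the nonempty-line predicate
theorem comm1 (ne : String → Bool) (L : List String) :
    (L.map PySem.Str.strip).filter (fun s => !(ne s)) =
      (L.filter (fun line => !(ne (PySem.Str.strip line)))).map PySem.Str.strip := by
  induction L with
  | nil => rfl
  | cons a t ih =>
    by_cases h : ne (PySem.Str.strip a) = true <;>
      simp [h, ih]

-- the single combined filter equals A's two-stage filter-map-filter pipeline
theorem comm2 (ne good : String → Bool) (L : List String) :
    (L.map PySem.Str.strip).filter (fun s => !(ne s) && good s) =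
      ((L.filter (fun line => !(ne (PySem.Str.strip line)))).map PySem.Str.strip).filter good := by
  rw [← comm1, List.filter_filter]
  exact List.filter_congr fun a _ => by rw [Bool.and_comm]

-- ===== VERDICT (by name: the statement is the Claim_ definition above) =====
theorem summarize_process_error_py_spec : Claim_equal_summarize_process_error_py := by
  intro output _
  unfold Spec_summarize_process_error_py summarize_process_error_py summarize_process_error_py_alt
  rw [spe_go_eq_pvScan, pvScan_spec]
  simp only [List.map_reverse, List.filter_reverse, List.head?_reverse]
  conv_rhs => rw [comm2, comm1]
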